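-- pv_equiv track=rewrite | github.com/cyeinfpro/Lumen | apps/api/app/runtime_settings.py | _expand_legacy_image_route_pairs
-- ===== SOURCE A (Python) =====
-- from typing import Iterable
--
-- _IMAGE_PRIMARY_ROUTE_MAPPING: dict[str, tuple[str, str]] = {
--     "responses": ("auto", "responses"),
--     "image2": ("auto", "image2"),
--     "image_jobs": ("image_jobs_only", "responses"),
--     "dual_race": ("auto", "dual_race"),
-- }
--
-- def image_primary_route_to_parts(raw: str | None) -> tuple[str, str]:
--     value = (raw or "").strip().lower()
--     return _IMAGE_PRIMARY_ROUTE_MAPPING.get(value, ("auto", "responses"))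
--
-- def _expand_legacy_image_route_pairs(
--     items: Iterable[tuple[str, str]],
-- ) -> list[tuple[str, str]]:
--     """Keep old clients that write image.primary_route in sync with new keys."""
--     result = list(items)
--     keys = {key for key, _ in result}
--     for key, value in list(result):
--         if key != "image.primary_route" or value == "":
--             continue
--         channel, engine = image_primary_route_to_parts(value)
--         if "image.channel" not in keys:
--             result.append(("image.channel", channel))
--             keys.add("image.channel")
--         if "image.engine" not in keys:
--             result.append(("image.engine", engine))
--             keys.add("image.engine")
--     return result
-- ===== SOURCE B (Python) =====
-- _IMAGE_PRIMARY_ROUTE_MAPPING: dict[str, tuple[str, str]] = {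
--     "responses": ("auto", "responses"),
--     "image2": ("auto", "image2"),
--     "image_jobs": ("image_jobs_only", "responses"),
--     "dual_race": ("auto", "dual_race"),
-- }
--
-- def image_primary_route_to_parts(raw):
--     value = (raw or "").strip().lower()
--     return _IMAGE_PRIMARY_ROUTE_MAPPING.get(value, ("auto", "responses"))
--
-- def _expand_legacy_image_route_pairs(items):
--     result = list(items)
--     # One fused scan, no key set: track only the three facts that matter.
--     route = None
--     has_channel = False
--     has_engine = False
--     for key, value in result:
--         if key == "image.channel":
--             has_channel = True
--         elif key == "image.engine":
--             has_engine = True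
--         elif key == "image.primary_route" and value != "" and route is None:
--             route = value
--     if route is not None:
--         channel, engine = image_primary_route_to_parts(route)
--         if not has_channel:
--             result.append(("image.channel", channel))
--         if not has_engine:
--             result.append(("image.engine", engine))
--     return result
-- ===== Notes on version B (the rewrite author's own statement) =====
-- stated objective: simpler
-- what changed: B drops A's key set and guarded mutating loop entirely: one fused scan accumulates just three facts (first non-empty primary route, whether image.channel / image.engine keys exist), then appends the derived pairs once.
import Mathlib
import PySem

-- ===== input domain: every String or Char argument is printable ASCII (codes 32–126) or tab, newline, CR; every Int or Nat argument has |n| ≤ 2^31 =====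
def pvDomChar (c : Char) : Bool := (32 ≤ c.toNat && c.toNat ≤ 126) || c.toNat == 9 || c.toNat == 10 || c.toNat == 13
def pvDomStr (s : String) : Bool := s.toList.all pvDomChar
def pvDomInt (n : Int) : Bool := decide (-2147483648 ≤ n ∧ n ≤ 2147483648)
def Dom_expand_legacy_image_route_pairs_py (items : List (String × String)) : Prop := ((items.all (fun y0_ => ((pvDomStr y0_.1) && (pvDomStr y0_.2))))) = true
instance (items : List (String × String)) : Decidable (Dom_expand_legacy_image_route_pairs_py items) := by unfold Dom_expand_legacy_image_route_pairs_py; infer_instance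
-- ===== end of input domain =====

-- B is simpler: it drops A's key set and guarded mutating loop, instead accumulating in one fused
-- scan the three facts that matter (first non-empty primary route, presence of the two derived
-- keys) and then appending the derived pairs once. Same return value on every input.

-- ===== PORT A =====
-- shared module helper: _IMAGE_PRIMARY_ROUTE_MAPPING / image_primary_route_to_parts
def pvRouteMapping : PySem.Dict String (String × String) :=
  PySem.Dict.ofList [("responses", ("auto", "responses")), ("image2", ("auto", "image2")),
    ("image_jobs", ("image_jobs_only", "responses")), ("dual_race", ("auto", "dual_race"))]

def image_primary_route_to_parts (raw : String) : String × String :=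
  PySem.Dict.getD pvRouteMapping (PySem.Str.lower (PySem.Str.strip raw)) ("auto", "responses")

-- one iteration of A's loop body over the state (result, keys)
def pvStepA (st : List (String × String) × PySem.Set String) (kv : String × String) :
    List (String × String) × PySem.Set String :=
  if kv.1 != "image.primary_route" || kv.2 == "" then st
  else
    let parts := image_primary_route_to_parts kv.2
    let st1 := if !(PySem.Set.contains st.2 "image.channel") then
        (st.1 ++ [("image.channel", parts.1)], PySem.Set.add st.2 "image.channel") else st
    if !(PySem.Set.contains st1.2 "image.engine") then
        (st1.1 ++ [("image.engine", parts.2)], PySem.Set.add st1.2 "image.engine") else st1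

def expand_legacy_image_route_pairs_py (items : List (String × String)) : List (String × String) :=
  let result := items
  let keys : PySem.Set String := PySem.Set.ofList (result.map Prod.fst)
  (result.foldl pvStepA (result, keys)).1

-- ===== PORT B =====
-- one iteration of B's fused scan: state = (route : Option, has_channel, has_engine)
def pvScanB (st : Option String × Bool × Bool) (kv : String × String) :
    Option String × Bool × Bool :=
  if kv.1 == "image.channel" then (st.1, true, st.2.2)
  else if kv.1 == "image.engine" then (st.1, st.2.1, true)
  else if kv.1 == "image.primary_route" && kv.2 != "" && st.1.isNone then
    (some kv.2, st.2.1, st.2.2)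
  else st

def expand_legacy_image_route_pairs_py_alt (items : List (String × String)) : List (String × String) :=
  let result := items
  let st := result.foldl pvScanB (none, false, false)
  match st.1 with
  | none => result
  | some route =>
    let parts := image_primary_route_to_parts route
    let result := if !st.2.1 then result ++ [("image.channel", parts.1)] else result
    if !st.2.2 then result ++ [("image.engine", parts.2)] else result

-- ===== PRECONDITION & SPEC =====
def Spec_expand_legacy_image_route_pairs_py (items : List (String × String)) (out : List (String × String)) : Prop := out = expand_legacy_image_route_pairs_py_alt items
instance (items : List (String × String)) (out : List (String × String)) : Decidable (Spec_expand_legacy_image_route_pairs_py items out) := by unfold Spec_expand_legacy_image_route_pairs_py; infer_instance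

-- ===== CLAIM (what is proved, stated in full; the proofs are below) =====
def Claim_equal_expand_legacy_image_route_pairs_py : Prop := ∀ (items : List (String × String)), Dom_expand_legacy_image_route_pairs_py items → Spec_expand_legacy_image_route_pairs_py items (expand_legacy_image_route_pairs_py items)

-- ===== LEMMAS AND PROOFS =====

def pvMatch (kv : String × String) : Bool := kv.1 == "image.primary_route" && kv.2 != ""

theorem pvMatch_guard_false (kv : String × String) (h : pvMatch kv = true) :
    (kv.1 != "image.primary_route" || kv.2 == "") = false := by
  unfold pvMatch at h
  cases hk : (kv.1 == "image.primary_route") <;> simp_all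

theorem pvStepA_skip (st : List (String × String) × PySem.Set String) (kv : String × String)
    (h : pvMatch kv = false) : pvStepA st kv = st := by
  unfold pvMatch at h
  unfold pvStepA
  rw [if_pos]
  cases hk : (kv.1 == "image.primary_route") <;> simp_all

theorem pvStepA_of_both (st : List (String × String) × PySem.Set String) (kv : String × String)
    (hc : "image.channel" ∈ st.2) (he : "image.engine" ∈ st.2) : pvStepA st kv = st := by
  unfold pvStepA
  split
  · rfl
  · simp [hc, he]

theorem pvStepA_both (st : List (String × String) × PySem.Set String) (kv : String × String)
    (h : pvMatch kv = true) :
    "image.channel" ∈ (pvStepA st kv).2 ∧ "image.engine" ∈ (pvStepA st kv).2 := by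
  unfold pvStepA
  rw [if_neg (by simp [pvMatch_guard_false kv h])]
  by_cases hc : "image.channel" ∈ st.2 <;>
    by_cases he : "image.engine" ∈ st.2 <;>
    simp_all

theorem pvFold_stable (l : List (String × String)) (st : List (String × String) × PySem.Set String)
    (hc : "image.channel" ∈ st.2) (he : "image.engine" ∈ st.2) :
    l.foldl pvStepA st = st := by
  induction l with
  | nil => rfl
  | cons a l ih => simp only [List.foldl_cons, pvStepA_of_both st a hc he]; exact ih

-- A's fold only ever acts on the first matching item
theorem pvFold_find (l : List (String × String)) (st : List (String × String) × PySem.Set String) :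
    l.foldl pvStepA st =
      match l.find? pvMatch with
      | none => st
      | some kv => pvStepA st kv := by
  induction l generalizing st with
  | nil => rfl
  | cons a l ih =>
    by_cases h : pvMatch a = true
    · obtain ⟨hc, he⟩ := pvStepA_both st a h
      simp only [List.foldl_cons, List.find?_cons_of_pos h, pvFold_stable l _ hc he]
    · rw [List.foldl_cons, pvStepA_skip st a (by simpa using h),
        List.find?_cons_of_neg (by simpa using h), ih]

-- closed form of B's fused scan
theorem pvScan_char (l : List (String × String)) (r : Option String) (c e : Bool) :
    l.foldl pvScanB (r, c, e) =
      ((if r.isSome then r else (l.find? pvMatch).map Prod.snd),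
       c || l.any (fun kv => kv.1 == "image.channel"),
       e || l.any (fun kv => kv.1 == "image.engine")) := by
  induction l generalizing r c e with
  | nil => cases r <;> simp
  | cons a l ih =>
    rw [List.foldl_cons]
    by_cases hc : a.1 = "image.channel"
    · have hm : ¬ pvMatch a = true := by simp [pvMatch, hc]
      rw [show pvScanB (r, c, e) a = (r, true, e) by simp [pvScanB, hc],
        ih, List.find?_cons_of_neg hm]
      simp [hc]
    · by_cases he : a.1 = "image.engine"
      · have hm : ¬ pvMatch a = true := by simp [pvMatch, he]
        rw [show pvScanB (r, c, e) a = (r, c, true) by simp [pvScanB, he],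
          ih, List.find?_cons_of_neg hm]
        simp [he]
      · by_cases hm : pvMatch a = true
        · obtain ⟨h1, h2⟩ : a.1 = "image.primary_route" ∧ ¬ a.2 = "" := by
            simpa [pvMatch] using hm
          cases r with
          | none =>
            rw [show pvScanB (none, c, e) a = (some a.2, c, e) by
                simp [pvScanB, h1, h2],
              ih, List.find?_cons_of_pos hm]
            simp [h1]
          | some v =>
            rw [show pvScanB (some v, c, e) a = (some v, c, e) by
                simp [pvScanB, hc, he],
              ih, List.find?_cons_of_pos hm]
            simp [h1]
        · have hg : (a.1 == "image.primary_route" && a.2 != "" && r.isNone) = false := by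
            unfold pvMatch at hm
            cases hk : (a.1 == "image.primary_route") <;> simp_all
          rw [show pvScanB (r, c, e) a = (r, c, e) by simp [pvScanB, hc, he, hg],
            ih, List.find?_cons_of_neg hm]
          simp only [List.any_cons,
            show (a.1 == "image.channel") = false from by simp [hc],
            show (a.1 == "image.engine") = false from by simp [he], Bool.false_or]

theorem pvContains_any (items : List (String × String)) (k : String) :
    PySem.Set.contains (PySem.Set.ofList (items.map Prod.fst)) k =
      items.any (fun kv => kv.1 == k) := by
  rw [Bool.eq_iff_iff]
  simp [PySem.Set.mem_ofList, List.any_eq_true]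

theorem pvContains_add_ne (items : List (String × String)) :
    PySem.Set.contains
        (PySem.Set.add (PySem.Set.ofList (items.map Prod.fst)) "image.channel") "image.engine" =
      items.any (fun kv => kv.1 == "image.engine") := by
  rw [Bool.eq_iff_iff]
  simp [PySem.Set.mem_add, PySem.Set.mem_ofList, List.any_eq_true,
    show ("image.engine" : String) ≠ "image.channel" from by decide]

theorem expand_legacy_image_route_pairs_py_spec : Claim_equal_expand_legacy_image_route_pairs_py := by
  intro items _
  unfold Spec_expand_legacy_image_route_pairs_py
  unfold expand_legacy_image_route_pairs_py expand_legacy_image_route_pairs_py_alt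
  simp only [pvFold_find, pvScan_char, Option.isSome_none, Bool.false_or, if_neg Bool.false_ne_true]
  cases hfind : items.find? pvMatch with
  | none => rfl
  | some kv =>
    have hm : pvMatch kv = true := List.find?_some hfind
    simp only [Option.map_some]
    unfold pvStepA
    rw [if_neg (by simp [pvMatch_guard_false kv hm])]
    have h1 := pvContains_any items "image.channel"
    have h2 := pvContains_any items "image.engine"
    have h3 := pvContains_add_ne items
    by_cases hc : items.any (fun kv => kv.1 == "image.channel") <;>
      by_cases he : items.any (fun kv => kv.1 == "image.engine") <;>
        simp only [h1, h2, h3, hc, he, Bool.not_true, Bool.not_false, Bool.false_eq_true,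
          if_true, if_false]
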